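-- pv_equiv track=rewrite | github.com/dxt9140/CV_Frogger | src/screen_cap.py | top_left
-- ===== SOURCE A (Python) =====
-- def top_left(pts):
--     # Given a set of points, choose the one with the greatest y and least x
--     chosen = None
--     for p in pts:
--         if chosen is None or p[1] > chosen[1]:
--             chosen = p
--         elif p[1] == chosen[1] and p[0] < chosen[0]:
--             chosen = p
--     return chosen
-- ===== SOURCE B (Python) =====
-- def top_left(pts):
--     # Two passes: find the greatest y, then pick the least-x point among those with that y.
--     if not pts:
--         return None
--     maxy = max(p[1] for p in pts)
--     return min((p for p in pts if p[1] == maxy), key=lambda p: p[0])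
-- ===== Notes on version B (the rewrite author's own statement) =====
-- stated objective: alternative
-- what changed: A's single fused scan with a None-seeded lexicographic update is replaced by two plain passes: compute the maximum y, then take min by x over the points with that y.
-- outside the precondition, e.g. on top_left([]): A returns None, B returns None
import Mathlib
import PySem

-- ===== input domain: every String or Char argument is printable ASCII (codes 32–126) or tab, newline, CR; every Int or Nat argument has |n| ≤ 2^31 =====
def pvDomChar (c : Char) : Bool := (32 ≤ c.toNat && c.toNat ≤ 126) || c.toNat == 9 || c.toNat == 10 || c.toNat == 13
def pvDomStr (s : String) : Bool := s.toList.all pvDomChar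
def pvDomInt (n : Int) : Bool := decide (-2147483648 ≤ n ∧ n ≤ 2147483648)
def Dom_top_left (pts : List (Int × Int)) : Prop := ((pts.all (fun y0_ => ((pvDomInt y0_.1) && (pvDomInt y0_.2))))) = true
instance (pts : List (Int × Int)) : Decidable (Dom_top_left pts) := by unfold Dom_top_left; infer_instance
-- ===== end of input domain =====

-- B replaces A's single fused scan by two plain passes (max y, then min x among that y); equal return value on nonempty input.

-- ===== PORT A =====
-- A's loop: an Option accumulator seeded with None, updated by the two branches in order.
def top_left (pts : List (Int × Int)) : Int × Int :=
  (pts.foldl (fun chosen p =>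
      match chosen with
      | none => some p
      | some c =>
        if p.2 > c.2 then some p
        else if p.2 = c.2 ∧ p.1 < c.1 then some p
        else some c) none).getD (0, 0)
  -- Python returns None on empty pts (no Int×Int value); Pre_ excludes it, the (0,0) default is never claimed.

-- ===== PORT B =====
def top_left_alt (pts : List (Int × Int)) : Int × Int :=
  match PySem.List.max? (pts.map Prod.snd) (fun y => y) with
  | none => (0, 0)  -- empty pts: Python B returns None; excluded by Pre_
  | some maxy =>
    match PySem.List.min? (pts.filter (fun p => p.2 == maxy)) (fun p => p.1) with
    | none => (0, 0)  -- unreachable: the filter keeps at least the max witness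
    | some m => m

-- ===== PRECONDITION & SPEC =====
-- Pre_ excludes only the empty list, on which both Pythons return None, which is not a value of type Int × Int.
def Pre_top_left (pts : List (Int × Int)) : Prop := pts ≠ []
instance (pts : List (Int × Int)) : Decidable (Pre_top_left pts) := by unfold Pre_top_left; infer_instance
def pvWitness_top_left : (List (Int × Int)) := [(3, 5), (1, 5), (2, 7)]
def Spec_top_left (pts : List (Int × Int)) (out : Int × Int) : Prop := out = top_left_alt pts
instance (pts : List (Int × Int)) (out : Int × Int) : Decidable (Spec_top_left pts out) := by unfold Spec_top_left; infer_instance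

-- ===== CLAIM (what is proved, stated in full; the proofs are below) =====
def Claim_equal_top_left : Prop := ∀ (pts : List (Int × Int)), Dom_top_left pts → Pre_top_left pts → Spec_top_left pts (top_left pts)

-- ===== LEMMAS AND PROOFS =====

-- The single invariant: on a nonempty list, A's fold returns some r, r.2 is what B's first
-- pass (max? of the y's) returns, and r is what B's second pass (min? by x of the filter) returns.
theorem top_left_main : ∀ (pts : List (Int × Int)), pts ≠ [] →
    ∃ r : Int × Int,
      pts.foldl (fun chosen p =>
        match chosen with
        | none => some p
        | some c =>
          if p.2 > c.2 then some p
          else if p.2 = c.2 ∧ p.1 < c.1 then some p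
          else some c) none = some r ∧
      PySem.List.max? (pts.map Prod.snd) (fun y => y) = some r.2 ∧
      PySem.List.min? (pts.filter (fun p => p.2 == r.2)) (fun p => p.1) = some r := by
  intro pts
  induction pts using List.reverseRecOn with
  | nil => intro h; exact absurd rfl h
  | append_singleton l p ih =>
    intro _
    rcases eq_or_ne l [] with rfl | hl
    · refine ⟨p, ?_, ?_, ?_⟩ <;> simp [PySem.List.max?, PySem.List.min?]
    · obtain ⟨r, hA, hmax, hmin⟩ := ih hl
      have hub : ∀ q ∈ l, q.2 ≤ r.2 := by
        intro q hq
        exact PySem.List.max?_isMax hmax q.2 (List.mem_map_of_mem hq)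
      rcases lt_trichotomy r.2 p.2 with hlt | heq | hgt
      · -- p has strictly greater y: it becomes the unique filtered element
        refine ⟨p, ?_, ?_, ?_⟩
        · simp [List.foldl_append, hA, hlt]
        · simp [PySem.List.max?] at hmax ⊢
          simp [hmax, hlt]
        · have hnil : l.filter (fun q => q.2 == p.2) = [] := by
            rw [List.filter_eq_nil_iff]
            intro q hq
            have := hub q hq
            simp only [beq_iff_eq]
            omega
          simp [List.filter_append, hnil, PySem.List.min?]
      · -- equal y: r is replaced iff p.1 < r.1, exactly the min? step on the appended filter
        refine ⟨if p.1 < r.1 then p else r, ?_, ?_, ?_⟩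
        · have : ¬ p.2 > r.2 := by omega
          simp [List.foldl_append, hA, heq]
          split_ifs with h <;> simp
        · have h2 : (if p.1 < r.1 then p else r).2 = r.2 := by split_ifs <;> simp [heq]
          rw [h2]
          simp [PySem.List.max?] at hmax ⊢
          simp [hmax]
          omega
        · have h2 : (if p.1 < r.1 then p else r).2 = r.2 := by split_ifs <;> simp [heq]
          rw [h2]
          have hf : (l ++ [p]).filter (fun q => q.2 == r.2) = l.filter (fun q => q.2 == r.2) ++ [p] := by
            simp [List.filter_append, heq]
          rw [hf]
          simp only [PySem.List.min?] at hmin ⊢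
          rw [List.foldl_append, hmin]
          simp only [List.foldl_cons, List.foldl_nil]
          split_ifs with h <;> rfl
      · -- strictly smaller y: p is ignored by both sides
        refine ⟨r, ?_, ?_, ?_⟩
        · have h1 : ¬ p.2 > r.2 := by omega
          have h2 : ¬ (p.2 = r.2 ∧ p.1 < r.1) := by rintro ⟨h, _⟩; omega
          simp [List.foldl_append, hA, h1, h2]
        · simp [PySem.List.max?] at hmax ⊢
          simp [hmax]
          omega
        · have hne : (p.2 == r.2) = false := by simp; omega
          simp [List.filter_append, hne, hmin]

-- ===== VERDICT (by name: the statement is the Claim_ definition above) =====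
theorem top_left_spec : Claim_equal_top_left := by
  intro pts _ hpre
  obtain ⟨r, hA, hmax, hmin⟩ := top_left_main pts hpre
  unfold Spec_top_left top_left top_left_alt
  rw [hA, hmax]
  simp [hmin]
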